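-- pv_equiv track=rewrite | github.com/mikhailprivalov/l2 | directions/forms/forms381.py | create_dot_table
-- ===== SOURCE A (Python) =====
-- def create_dot_table(count, odd, even):
--     col_width = []
--     for i in range(0, count):
--         if i % 2 == 0:
--             col_width.append(even)
--         else:
--             col_width.append(odd)
--     return col_width
-- ===== SOURCE B (Python) =====
-- def create_dot_table(count, odd, even):
--     # tile the two-column period and truncate to length; same values, no per-index branch
--     return ([even, odd] * ((count + 1) // 2))[:count]
-- ===== Notes on version B (the rewrite author's own statement) =====
-- stated objective: idiomatic
-- what changed: Replaces the per-index parity branch and append loop with tiling the two-element block [even, odd] ((count+1)//2) times via list multiplication and truncating to count.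
import Mathlib
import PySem

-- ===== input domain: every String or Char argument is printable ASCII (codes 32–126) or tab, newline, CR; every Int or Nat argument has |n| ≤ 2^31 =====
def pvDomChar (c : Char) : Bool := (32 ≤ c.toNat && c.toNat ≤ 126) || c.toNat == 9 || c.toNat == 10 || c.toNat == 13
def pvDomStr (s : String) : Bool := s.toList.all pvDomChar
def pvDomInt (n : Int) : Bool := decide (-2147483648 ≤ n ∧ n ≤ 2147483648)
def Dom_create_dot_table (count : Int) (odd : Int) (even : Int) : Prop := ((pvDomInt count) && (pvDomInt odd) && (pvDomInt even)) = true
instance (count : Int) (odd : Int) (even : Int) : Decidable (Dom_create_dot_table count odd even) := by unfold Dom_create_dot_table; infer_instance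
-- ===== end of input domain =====

-- B replaces the per-index parity branch with tiling [even, odd] and truncating (idiomatic, same cost).

-- ===== PORT A =====
-- loop over range(0, count), appending `even` on even i and `odd` on odd i
def create_dot_table (count : Int) (odd : Int) (even : Int) : List Int :=
  (PySem.List.pyRange 0 count 1).foldl
    (fun col_width i =>
      if PySem.Int.mod i 2 == 0 then col_width ++ [even] else col_width ++ [odd])
    []

-- ===== PORT B =====
-- ([even, odd] * ((count + 1) // 2))[:count]; for count < 0 the tiled list is already
-- empty, so `take count.toNat` is exact for the slice [:count] on every input
def create_dot_table_alt (count : Int) (odd : Int) (even : Int) : List Int :=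
  (List.flatten (List.replicate ((PySem.Int.floordiv (count + 1) 2).toNat) [even, odd])).take
    count.toNat

-- ===== PRECONDITION & SPEC =====
def Spec_create_dot_table (count : Int) (odd : Int) (even : Int) (out : List Int) : Prop := out = create_dot_table_alt count odd even
instance (count : Int) (odd : Int) (even : Int) (out : List Int) : Decidable (Spec_create_dot_table count odd even out) := by unfold Spec_create_dot_table; infer_instance

-- ===== CLAIM (what is proved, stated in full; the proofs are below) =====
def Claim_equal_create_dot_table : Prop := ∀ (count : Int) (odd : Int) (even : Int), Dom_create_dot_table count odd even → Spec_create_dot_table count odd even (create_dot_table count odd even)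

-- ===== LEMMAS AND PROOFS =====

-- A's loop, over a natural count, is the parity-map over List.range
theorem create_dot_table_natCast (odd even : Int) (n : Nat) :
    create_dot_table (n : Int) odd even
      = (List.range n).map (fun k => if k % 2 = 0 then even else odd) := by
  unfold create_dot_table
  rw [PySem.List.pyRange_one]
  have hbody : (fun (col_width : List Int) (i : Int) =>
      if PySem.Int.mod i 2 == 0 then col_width ++ [even] else col_width ++ [odd])
      = (fun col_width i =>
          col_width ++ [if PySem.Int.mod i 2 == 0 then even else odd]) := by
    funext acc i
    by_cases h : PySem.Int.mod i 2 == 0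
    · rw [if_pos h, if_pos h]
    · rw [if_neg h, if_neg h]
  rw [hbody]
  rw [List.foldl_map, PySem.List.foldl_append_singleton_eq_map]
  simp only [Int.sub_zero, Int.toNat_natCast, List.nil_append]
  apply List.map_congr_left
  intro k _
  rw [PySem.Int.mod_eq_emod_of_pos (show (0:Int) < 2 by decide)]
  have : ((0:Int) + (k : Int)) % 2 = ((k % 2 : Nat) : Int) := by
    push_cast; omega
  rw [this]
  rcases Nat.mod_two_eq_zero_or_one k with h | h <;> simp [h]

-- the tile-and-truncate closed form equals the parity map, by two-step induction
theorem tile_eq_parity_map (odd even : Int) : ∀ n : Nat,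
    (List.range n).map (fun k => if k % 2 = 0 then even else odd)
      = (List.flatten (List.replicate ((n + 1) / 2) [even, odd])).take n
  | 0 => by simp
  | 1 => by simp
  | (n + 2) => by
    have hrange : List.range (n + 2)
        = 0 :: 1 :: (List.range n).map (fun k => k + 2) := by
      rw [List.range_succ_eq_map, List.range_succ_eq_map, List.map_cons, List.map_map]
      rfl
    have hdiv : (n + 2 + 1) / 2 = (n + 1) / 2 + 1 := by omega
    rw [hrange, hdiv]
    simp only [List.map_cons, List.map_map, List.replicate_succ, List.flatten_cons,
      List.cons_append, List.nil_append, List.take_succ_cons]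
    have hcomp : ((fun k => if k % 2 = 0 then even else odd) ∘ fun k => k + 2)
        = (fun k => if k % 2 = 0 then even else odd) := by
      funext k
      simp [Function.comp, Nat.add_mod_right]
    rw [hcomp, tile_eq_parity_map odd even n]
    simp

-- ===== VERDICT (by name: the statement is the Claim_ definition above) =====
theorem create_dot_table_spec : Claim_equal_create_dot_table := by
  intro count odd even _
  unfold Spec_create_dot_table
  by_cases h : count ≤ 0
  · -- count ≤ 0: both sides are []
    unfold create_dot_table create_dot_table_alt
    rw [PySem.List.pyRange_one_eq_nil h]
    have hfd : (PySem.Int.floordiv (count + 1) 2).toNat = 0 := by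
      rw [PySem.Int.floordiv_eq_ediv_of_pos (show (0:Int) < 2 by decide)]
      omega
    rw [hfd]
    simp
  · -- count > 0: rewrite count as a natural number and use the two lemmas
    obtain ⟨n, rfl⟩ : ∃ n : Nat, count = (n : Int) :=
      ⟨count.toNat, (Int.toNat_of_nonneg (by omega)).symm⟩
    rw [create_dot_table_natCast]
    unfold create_dot_table_alt
    have hfd : (PySem.Int.floordiv ((n : Int) + 1) 2).toNat = (n + 1) / 2 := by
      rw [PySem.Int.floordiv_eq_ediv_of_pos (show (0:Int) < 2 by decide)]
      omega
    rw [hfd, Int.toNat_natCast]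
    exact tile_eq_parity_map odd even n
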